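-- pv_equiv track=rewrite | github.com/AdamOtto/Daily-Challenges | Challenge1250.py | Solution
-- ===== SOURCE A (Python) =====
-- def Solution(ar):
--     d = {}
--     for i in range(len(ar)):
--         if ar[i] not in d:
--             d[ar[i]] = 0
--         d[ar[i]] += 1
--     even = 0
--     odd = 0
--     for key,val in d.items():
--         if val % 2 == 0:
--             even += 1
--         else:
--             odd += 1
--
--     if (odd == 1 or odd == 0):
--         return True
--     return False
-- ===== SOURCE B (Python) =====
-- def Solution(ar):
--     odds = set()
--     for x in ar:
--         if x in odds:
--             odds.discard(x)
--         else:
--             odds.add(x)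
--     return len(odds) <= 1
-- ===== Notes on version B (the rewrite author's own statement) =====
-- stated objective: idiomatic
-- what changed: Replaces the frequency dict plus a second even/odd counting pass with a single pass maintaining a parity set (toggle membership per element) and returning len(odds) <= 1.
import Mathlib
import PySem

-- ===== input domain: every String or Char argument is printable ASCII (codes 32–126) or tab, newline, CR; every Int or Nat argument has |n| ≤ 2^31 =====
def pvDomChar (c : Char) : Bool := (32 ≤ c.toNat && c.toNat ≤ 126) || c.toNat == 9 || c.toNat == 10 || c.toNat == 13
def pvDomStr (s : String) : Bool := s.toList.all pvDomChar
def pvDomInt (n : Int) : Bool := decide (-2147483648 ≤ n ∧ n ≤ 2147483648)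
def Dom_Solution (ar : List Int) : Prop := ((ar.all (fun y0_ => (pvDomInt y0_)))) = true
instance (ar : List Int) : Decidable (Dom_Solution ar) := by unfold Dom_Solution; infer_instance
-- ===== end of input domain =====

-- B replaces A's frequency dict + second even/odd counting pass by one pass maintaining a parity set (idiomatic, same asymptotic cost).


-- ===== PORT A =====
def Solution (ar : List Int) : Bool :=
  let d : PySem.Dict Int Int :=
    (PySem.List.pyRange 0 (ar.length : Int) 1).foldl (fun d i =>
      let x := PySem.List.pyGetD ar i 0
      let d := if d.contains x then d else d.insert x 0
      d.insert x (d.getD x 0 + 1)) PySem.Dict.empty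
  let eo : Int × Int := d.items.foldl (fun eo kv =>
      if PySem.Int.mod kv.2 2 = 0 then (eo.1 + 1, eo.2) else (eo.1, eo.2 + 1)) (0, 0)
  if eo.2 = 1 ∨ eo.2 = 0 then true else false

-- ===== PORT B =====
-- the loop body of Source B: toggle x's membership in the parity set
def toggleStep (s : PySem.Set Int) (x : Int) : PySem.Set Int :=
  if PySem.Set.contains s x then PySem.Set.discard s x else PySem.Set.add s x

def Solution_alt (ar : List Int) : Bool :=
  let odds : PySem.Set Int := ar.foldl toggleStep PySem.Set.empty
  decide (PySem.Set.len odds ≤ 1)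

-- ===== PRECONDITION & SPEC =====
def Spec_Solution (ar : List Int) (out : Bool) : Prop := out = Solution_alt ar
instance (ar : List Int) (out : Bool) : Decidable (Spec_Solution ar out) := by unfold Spec_Solution; infer_instance

-- ===== CLAIM (what is proved, stated in full; the proofs are below) =====
def Claim_equal_Solution : Prop := ∀ (ar : List Int), Dom_Solution ar → Spec_Solution ar (Solution ar)

-- ===== LEMMAS AND PROOFS =====

-- A's loop body (setdefault-style insert then += 1) is one counter increment
lemma aStep_eq (d : PySem.Dict Int Int) (x : Int) :
    (let d' := if d.contains x then d else d.insert x 0;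
     d'.insert x (d'.getD x 0 + 1)) = d.insert x (d.getD x 0 + 1) := by
  by_cases h : d.contains x = true
  · simp [h]
  · have h' : d.contains x = false := by simpa using h
    simp only [h', Bool.false_eq_true, if_false]
    rw [PySem.Dict.getD_insert_self, PySem.Dict.insert_insert_self,
        PySem.Dict.getD_of_not_contains d 0 h']

-- the second component of A's even/odd counting fold counts the odd values
lemma oddSnd (l : List (Int × Int)) (e o : Int) :
    (l.foldl (fun eo kv =>
        if PySem.Int.mod kv.2 2 = 0 then (eo.1 + 1, eo.2) else (eo.1, eo.2 + 1)) (e, o)).2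
      = o + (l.countP (fun kv => !decide (PySem.Int.mod kv.2 2 = 0)) : Int) := by
  induction l generalizing e o with
  | nil => simp
  | cons kv l ih =>
    rw [List.foldl_cons, List.countP_cons]
    by_cases h : PySem.Int.mod kv.2 2 = 0
    · rw [if_pos h, ih]
      simp only [h, decide_true, Bool.not_true, Bool.false_eq_true, if_false, Nat.add_zero]
    · rw [if_neg h, ih]
      simp only [h, decide_false, Bool.not_false, if_true]
      push_cast; ring

-- B's toggle loop: the result is duplicate-free and holds exactly the elements
-- whose count parity flips the initial membership
lemma toggle_inv (l : List Int) : ∀ s : PySem.Set Int, s.Nodup →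
    (l.foldl toggleStep s).Nodup ∧
      ∀ k, (k ∈ l.foldl toggleStep s ↔ ¬(k ∈ s ↔ l.count k % 2 = 1)) := by
  induction l with
  | nil =>
    intro s hs
    exact ⟨hs, fun k => by simp⟩
  | cons x l ih =>
    intro s hs
    have hs' : (toggleStep s x).Nodup := by
      unfold toggleStep
      by_cases hx : x ∈ s
      · rw [if_pos ((PySem.Set.contains_iff s x).mpr hx)]
        exact PySem.Set.nodup_discard s x hs
      · rw [if_neg (fun hc => hx ((PySem.Set.contains_iff s x).mp hc))]
        exact PySem.Set.nodup_add s x hs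
    obtain ⟨hn, hm⟩ := ih (toggleStep s x) hs'
    refine ⟨by simpa using hn, fun k => ?_⟩
    rw [List.foldl_cons, hm k]
    have hmem : k ∈ toggleStep s x ↔ ¬(k ∈ s ↔ k = x) := by
      unfold toggleStep
      by_cases hx : x ∈ s
      · rw [if_pos ((PySem.Set.contains_iff s x).mpr hx), PySem.Set.mem_discard]
        by_cases hkx : k = x
        · subst hkx; simp [hx]
        · simp [hkx]
      · rw [if_neg (fun hc => hx ((PySem.Set.contains_iff s x).mp hc)), PySem.Set.mem_add]
        by_cases hkx : k = x
        · subst hkx; simp [hx]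
        · simp [hkx]
    rw [hmem, List.count_cons]
    by_cases hkx : k = x
    · subst hkx
      by_cases hks : k ∈ s <;> simp [hks] <;> omega
    · have hxk : ¬ x = k := fun h => hkx h.symm
      by_cases hks : k ∈ s <;> simp [hkx, hxk, hks]

-- A's dict-building loop is Counter(ar)
lemma aFold_eq (ar : List Int) :
    (PySem.List.pyRange 0 (ar.length : Int) 1).foldl (fun d i =>
      let x := PySem.List.pyGetD ar i 0
      let d := if d.contains x then d else d.insert x 0
      d.insert x (d.getD x 0 + 1)) PySem.Dict.empty = PySem.Dict.counter ar := by
  rw [PySem.List.foldl_pyRange_zero_pyGetD' ar 0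
        (fun (d : PySem.Dict Int Int) (x : Int) =>
          (if d.contains x then d else d.insert x 0).insert x
            ((if d.contains x then d else d.insert x 0).getD x 0 + 1)) PySem.Dict.empty]
  rw [show (fun (d : PySem.Dict Int Int) (x : Int) =>
        (if d.contains x then d else d.insert x 0).insert x
          ((if d.contains x then d else d.insert x 0).getD x 0 + 1))
      = fun d x => d.insert x (d.getD x 0 + 1) from funext fun d => funext fun x => aStep_eq d x]
  exact PySem.Dict.foldl_insert_getD_add_one_eq_counter ar

-- ===== VERDICT (by name: the statement is the Claim_ definition above) =====
theorem Solution_spec : Claim_equal_Solution := by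
  intro ar _
  unfold Spec_Solution Solution Solution_alt
  rw [aFold_eq]
  simp only [PySem.Dict.items_counter, oddSnd, zero_add, List.countP_map]
  -- B side: the parity set holds exactly the elements of odd count
  obtain ⟨hnd, hmem⟩ := toggle_inv ar PySem.Set.empty List.nodup_nil
  set odds := ar.foldl toggleStep PySem.Set.empty with hodds
  have hmem' : ∀ k, k ∈ odds ↔ ar.count k % 2 = 1 := by
    intro k; rw [hmem k]; simp [PySem.Set.empty]
  -- the filtered key set and the parity set are nodup lists with the same members
  have hperm : ((PySem.Set.ofList ar).filter
      ((fun kv : Int × Int => !decide (PySem.Int.mod kv.2 2 = 0)) ∘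
        fun k => (k, (ar.count k : Int)))).Perm odds := by
    rw [List.perm_ext_iff_of_nodup (List.Nodup.filter _ (PySem.Set.nodup_ofList ar)) hnd]
    intro k
    rw [List.mem_filter, hmem' k, PySem.Set.mem_ofList]
    have hcast : PySem.Int.mod ((ar.count k : Nat) : Int) 2 = ((ar.count k % 2 : Nat) : Int) := by
      exact_mod_cast PySem.Int.mod_natCast (ar.count k) 2
    simp only [Function.comp_apply, hcast, Bool.not_eq_true', decide_eq_false_iff_not]
    constructor
    · rintro ⟨_, h⟩
      omega
    · intro h
      refine ⟨List.count_pos_iff.mp (by omega), by omega⟩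
  have hlen : (PySem.Set.ofList ar).countP
      ((fun kv : Int × Int => !decide (PySem.Int.mod kv.2 2 = 0)) ∘
        fun k => (k, (ar.count k : Int))) = odds.length := by
    rw [List.countP_eq_length_filter]
    exact hperm.length_eq
  rw [hlen]
  simp only [PySem.Set.len]
  by_cases h : (odds.length : Int) ≤ 1
  · rw [if_pos (by omega)]
    exact (decide_eq_true h).symm
  · rw [if_neg (by omega)]
    exact (decide_eq_false h).symm
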